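-- pv_equiv track=rewrite | github.com/fuentesmarlon/Sodoku---15Puzzle | Problem.py | column
-- ===== SOURCE A (Python) =====
-- def column(board):
--     listColumn=[]
--     for column in range(len(board[0])):
--         value = 0
--         for row in board:
--             value+=row[column]
--         if value==10:
--             listColumn.append(True)
--         else:
--             listColumn.append(False)
--     return listColumn
-- ===== SOURCE B (Python) =====
-- def column(board):
--     # One pass over the rows with a running vector of column sums,
--     # instead of re-scanning all rows once per column.
--     sums = [0] * len(board[0])
--     for row in board:
--         sums = [s + row[c] for c, s in enumerate(sums)]
--     return [s == 10 for s in sums]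
-- ===== Notes on version B (the rewrite author's own statement) =====
-- stated objective: alternative
-- what changed: Single pass over the rows maintaining a running vector of per-column partial sums, instead of one full re-scan of all rows for each column.
import Mathlib
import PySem

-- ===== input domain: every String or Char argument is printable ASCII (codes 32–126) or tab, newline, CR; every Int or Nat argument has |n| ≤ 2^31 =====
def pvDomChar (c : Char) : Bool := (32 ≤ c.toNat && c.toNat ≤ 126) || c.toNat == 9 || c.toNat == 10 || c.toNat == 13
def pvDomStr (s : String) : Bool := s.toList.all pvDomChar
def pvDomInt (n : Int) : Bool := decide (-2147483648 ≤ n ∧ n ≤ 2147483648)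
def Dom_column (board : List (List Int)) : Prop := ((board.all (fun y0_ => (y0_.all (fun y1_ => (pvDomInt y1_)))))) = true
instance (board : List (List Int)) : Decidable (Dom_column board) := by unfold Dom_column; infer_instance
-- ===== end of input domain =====

-- B differs from A in decomposition only: one pass over the rows with a running
-- vector of per-column partial sums, instead of A's per-column re-scan of all rows.

-- ===== PORT A =====
-- row[column] is pyGet?; the `.getD 0` default is only reached outside Pre_column
-- (where Python raises IndexError).
def column (board : List (List Int)) : List Bool :=
  (PySem.List.pyRange 0 (((PySem.List.pyGet? board 0).getD []).length : Int) 1).foldl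
    (fun listColumn c =>
      listColumn ++
        [(board.foldl (fun value row => value + (PySem.List.pyGet? row c).getD 0) 0) == 10])
    []

-- ===== PORT B =====
-- same convention: pyGet?/getD 0 is IndexError territory, excluded by Pre_column
def column_alt (board : List (List Int)) : List Bool :=
  (board.foldl
    (fun sums row =>
      (PySem.List.enumerate sums 0).map (fun p => p.2 + (PySem.List.pyGet? row p.1).getD 0))
    (List.replicate ((PySem.List.pyGet? board 0).getD []).length 0)).map (fun s => s == 10)

-- ===== PRECONDITION & SPEC =====
-- Pre_ excludes exactly the inputs where Python A raises IndexError: the empty board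
-- (board[0]) and boards with a row shorter than the first row (row[column]).
def Pre_column (board : List (List Int)) : Prop :=
  board ≠ [] ∧ ∀ row ∈ board, (board.headD []).length ≤ row.length
instance (board : List (List Int)) : Decidable (Pre_column board) := by
  unfold Pre_column; infer_instance
def pvWitness_column : List (List Int) := [[10, 0], [0, 5]]

def Spec_column (board : List (List Int)) (out : List Bool) : Prop := out = column_alt board
instance (board : List (List Int)) (out : List Bool) : Decidable (Spec_column board out) := by
  unfold Spec_column; infer_instance

-- ===== CLAIM (what is proved, stated in full; the proofs are below) =====
def Claim_equal_column : Prop :=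
  ∀ (board : List (List Int)), Dom_column board → Pre_column board →
    Spec_column board (column board)

-- ===== LEMMAS AND PROOFS =====

-- folding `+ f x` distributes over the initial accumulator
theorem foldl_add_shift {α : Type} (f : α → Int) (bs : List α) :
    ∀ (a : Int), bs.foldl (fun v x => v + f x) a = a + bs.foldl (fun v x => v + f x) 0 := by
  induction bs with
  | nil => simp
  | cons x bs ih =>
    intro a
    simp only [List.foldl_cons]
    rw [ih (a + f x), ih (0 + f x)]
    ring

-- pointwise value of B's accumulated sums after folding all rows
theorem foldl_colstep_getElem? (bs : List (List Int)) :
    ∀ (sums : List Int) (k : Nat),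
      (bs.foldl (fun sums row =>
          (PySem.List.enumerate sums 0).map
            (fun p => p.2 + (PySem.List.pyGet? row p.1).getD 0)) sums)[k]? =
      sums[k]?.map (fun s =>
        s + bs.foldl (fun v row => v + (PySem.List.pyGet? row (k : Int)).getD 0) 0) := by
  induction bs with
  | nil => intro sums k; simp
  | cons row bs ih =>
    intro sums k
    simp only [List.foldl_cons]
    rw [ih]
    rw [List.getElem?_map, PySem.List.getElem?_enumerate]
    rcases h : sums[k]? with _ | s
    · simp
    · simp only [Option.map_some]
      congr 1
      simp only [zero_add]
      rw [foldl_add_shift (fun row => (PySem.List.pyGet? row (k : Int)).getD 0) bs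
            ((PySem.List.pyGet? row (k : Int)).getD 0)]
      ring

-- ===== VERDICT (by name: the statement is the Claim_ definition above) =====
theorem column_spec : Claim_equal_column := by
  intro board _ _
  unfold Spec_column column column_alt
  rw [PySem.List.foldl_append_singleton_eq_map, List.nil_append]
  set n := ((PySem.List.pyGet? board 0).getD []).length with hn
  apply List.ext_getElem?
  intro k
  rw [List.getElem?_map, List.getElem?_map, foldl_colstep_getElem?]
  by_cases hk : k < n
  · rw [PySem.List.pyRange_one]
    simp [hk]
  · have hr : (List.replicate n (0 : Int))[k]? = none :=
      List.getElem?_eq_none (by simpa using Nat.not_lt.mp hk)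
    have hp : (PySem.List.pyRange 0 (n : Int) 1)[k]? = none :=
      List.getElem?_eq_none (by rw [PySem.List.length_pyRange_one]; omega)
    rw [hr, hp]
    simp
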